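-- pv_equiv track=rewrite | github.com/MrBrantCode/unitest_baseline | mut_generate/mist_train_cf/cf_80291/solution.py | nextSmallerElements
-- ===== SOURCE A (Python) =====
-- def nextSmallerElements(nums):
--     n = len(nums)
--     res = [-1] * n
--     stack = []
--
--     for i in range(n * 2):
--         while stack and (nums[stack[-1]] > nums[i % n]):
--             res[stack.pop()] = nums[i % n]
--         stack.append(i % n)
--
--     return res
-- ===== SOURCE B (Python) =====
-- def nextSmallerElements(nums):
--     n = len(nums)
--     res = [-1] * n
--     for i in range(n):
--         for j in range(1, n):
--             v = nums[(i + j) % n]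
--             if v < nums[i]:
--                 res[i] = v
--                 break
--     return res
-- ===== Notes on version B (the rewrite author's own statement) =====
-- stated objective: simpler
-- what changed: Replaced the monotonic-stack two-pass-over-a-doubled-range algorithm by a direct brute-force circular scan: for each index, scan the next n-1 circular positions and take the first strictly smaller value, -1 if none.
import Mathlib
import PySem

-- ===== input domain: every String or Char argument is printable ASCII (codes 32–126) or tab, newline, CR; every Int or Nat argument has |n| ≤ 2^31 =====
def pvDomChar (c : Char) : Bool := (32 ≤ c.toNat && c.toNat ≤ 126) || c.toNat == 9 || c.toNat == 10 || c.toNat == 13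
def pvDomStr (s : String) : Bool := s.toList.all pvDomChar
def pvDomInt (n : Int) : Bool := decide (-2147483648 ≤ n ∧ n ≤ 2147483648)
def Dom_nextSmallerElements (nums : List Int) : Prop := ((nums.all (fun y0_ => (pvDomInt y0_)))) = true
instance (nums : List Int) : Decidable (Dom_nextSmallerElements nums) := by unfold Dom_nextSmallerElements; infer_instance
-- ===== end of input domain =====

-- B replaces A's monotonic-stack pass over a doubled index range by a direct brute-force
-- circular scan (first strictly smaller value among the next n-1 circular positions); objective: simpler.

-- ===== PORT A =====
-- A's inner `while stack and nums[stack[-1]] > nums[i % n]: res[stack.pop()] = nums[i % n]`.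
-- The stack is a Lean list with head = top; all indices touched are in range, so
-- pySetD/pyGetD are exact here.
def pvWhileA (nums : List Int) (m : Int) : List Int → List Int → List Int × List Int
  | res, [] => (res, [])
  | res, t :: rest =>
    if PySem.List.pyGetD nums t 0 > PySem.List.pyGetD nums m 0 then
      pvWhileA nums m (PySem.List.pySetD res t (PySem.List.pyGetD nums m 0)) rest
    else (res, t :: rest)

-- one iteration of A's `for i in range(n * 2)` loop body
def pvStepA (nums : List Int) (st : List Int × List Int) (i : Int) : List Int × List Int :=
  let m := PySem.Int.mod i (nums.length : Int)
  let p := pvWhileA nums m st.1 st.2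
  (p.1, m :: p.2)

def nextSmallerElements (nums : List Int) : List Int :=
  ((PySem.List.pyRange 0 ((nums.length : Int) * 2) 1).foldl (pvStepA nums)
    (List.replicate nums.length (-1), [])).1

-- ===== PORT B =====
-- Source B's inner loop `for j in range(1, n): … break` / leave -1; indices are in-range Nats,
-- so List.getD is exact.
def pvFirstSmaller (nums : List Int) (n i : Nat) : Int :=
  ((List.range' 1 (n - 1)).findSome? (fun j =>
      let v := nums.getD ((i + j) % n) 0
      if v < nums.getD i 0 then some v else none)).getD (-1)

def nextSmallerElements_alt (nums : List Int) : List Int :=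
  (List.range nums.length).map (fun i => pvFirstSmaller nums nums.length i)

-- ===== PRECONDITION & SPEC =====
def Spec_nextSmallerElements (nums : List Int) (out : List Int) : Prop := out = nextSmallerElements_alt nums
instance (nums : List Int) (out : List Int) : Decidable (Spec_nextSmallerElements nums out) := by unfold Spec_nextSmallerElements; infer_instance

-- ===== CLAIM (what is proved, stated in full; the proofs are below) =====
def Claim_equal_nextSmallerElements : Prop := ∀ (nums : List Int), Dom_nextSmallerElements nums → Spec_nextSmallerElements nums (nextSmallerElements nums)

-- ===== LEMMAS AND PROOFS =====

-- the circular value at step u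
def pvCirc (nums : List Int) (u : Nat) : Int := nums.getD (u % nums.length) 0

-- step t (pushed at iteration t) is still on the stack after the first k iterations
def pvGood (nums : List Int) (k t : Nat) : Bool :=
  (List.range' (t+1) (k - (t+1))).all (fun u => decide (pvCirc nums t ≤ pvCirc nums u))

-- value of res[x] after the first k iterations: the first strictly smaller circular value
-- seen at a step in (x, k), else -1
def pvPFS (nums : List Int) (k x : Nat) : Int :=
  match (List.range' (x+1) (k - (x+1))).find? (fun u => decide (pvCirc nums u < pvCirc nums x)) with
  | some u => pvCirc nums u
  | none => -1

def pvEnc (nums : List Int) (t : Nat) : Int := ((t % nums.length : Nat) : Int)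

def pvResS (nums : List Int) (k : Nat) : List Int := (List.range nums.length).map (pvPFS nums k)

def pvStkS (nums : List Int) (k : Nat) : List Int :=
  (((List.range k).filter (pvGood nums k)).reverse).map (pvEnc nums)

def pvLoop (nums : List Int) (k : Nat) : List Int × List Int :=
  (List.range k).foldl (fun st (j : Nat) => pvStepA nums st (j : Int))
    (List.replicate nums.length (-1), [])

lemma pvCirc_period (nums : List Int) (u : Nat) : pvCirc nums (u + nums.length) = pvCirc nums u := by
  simp [pvCirc, Nat.add_mod_right]

lemma pvMod_char (nums : List Int) {t x : Nat} (ht : t < 2 * nums.length)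
    (h : t % nums.length = x) : t = x ∨ t = x + nums.length := by
  rcases Nat.lt_or_ge t nums.length with h1 | h1
  · left; rw [Nat.mod_eq_of_lt h1] at h; omega
  · right
    rw [Nat.mod_eq_sub_mod h1, Nat.mod_eq_of_lt (by omega)] at h
    omega

lemma pvGood_iff (nums : List Int) (k t : Nat) :
    pvGood nums k t = true ↔ ∀ u, t < u → u < k → pvCirc nums t ≤ pvCirc nums u := by
  unfold pvGood
  rw [List.all_eq_true]
  constructor
  · intro h u h1 h2
    have := h u (by rw [List.mem_range'_1]; omega)
    simpa using this
  · intro h u hu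
    rw [List.mem_range'_1] at hu
    simp only [decide_eq_true_eq]
    exact h u (by omega) (by omega)

lemma pvGetD_enc (nums : List Int) (t : Nat) :
    PySem.List.pyGetD nums (pvEnc nums t) 0 = pvCirc nums t := by
  rw [pvEnc, PySem.List.pyGetD_natCast]
  rfl

lemma pvWhileA_eq (nums : List Int) (k : Nat) :
    ∀ (L : List Nat), L.Pairwise (fun a b => pvCirc nums b ≤ pvCirc nums a) → ∀ (res : List Int),
    pvWhileA nums (pvEnc nums k) res (L.map (pvEnc nums))
      = ((L.filter (fun t => decide (pvCirc nums k < pvCirc nums t))).foldl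
           (fun r t => r.set (t % nums.length) (pvCirc nums k)) res,
         (L.filter (fun t => decide (pvCirc nums t ≤ pvCirc nums k))).map (pvEnc nums)) := by
  intro L
  induction L with
  | nil => intro _ res; simp [pvWhileA]
  | cons a L ih =>
    intro hp res
    rw [List.pairwise_cons] at hp
    by_cases hc : pvCirc nums k < pvCirc nums a
    · have : PySem.List.pyGetD nums (pvEnc nums a) 0 > PySem.List.pyGetD nums (pvEnc nums k) 0 := by
        rw [pvGetD_enc, pvGetD_enc]; exact hc
      simp only [List.map_cons, pvWhileA, if_pos this]
      simp only [pvGetD_enc]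
      rw [ih hp.2 (PySem.List.pySetD res (pvEnc nums a) (pvCirc nums k))]
      have hfa : (decide (pvCirc nums k < pvCirc nums a)) = true := by simpa using hc
      have hfb : (decide (pvCirc nums a ≤ pvCirc nums k)) = false := by simpa using hc
      rw [pvEnc, PySem.List.pySetD_natCast]
      simp [hfa, hfb]
    · have : ¬ (PySem.List.pyGetD nums (pvEnc nums a) 0 > PySem.List.pyGetD nums (pvEnc nums k) 0) := by
        rw [pvGetD_enc, pvGetD_enc]; exact hc
      simp only [List.map_cons, pvWhileA, if_neg this]
      have hle : pvCirc nums a ≤ pvCirc nums k := le_of_not_gt hc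
      have h1 : (a :: L).filter (fun t => decide (pvCirc nums k < pvCirc nums t)) = [] := by
        rw [List.filter_eq_nil_iff]
        intro t ht
        rcases List.mem_cons.mp ht with h | h
        · subst h; simpa using hc
        · have := hp.1 t h
          simp only [decide_eq_true_eq]; omega
      have h2 : (a :: L).filter (fun t => decide (pvCirc nums t ≤ pvCirc nums k)) = a :: L := by
        rw [List.filter_eq_self]
        intro t ht
        rcases List.mem_cons.mp ht with h | h
        · subst h; simpa using hle
        · have := hp.1 t h
          simp only [decide_eq_true_eq]; omega
      rw [h1, h2]
      simp

lemma pvFoldlSet_length (n : Nat) (c : Int) :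
    ∀ (ts : List Nat) (res : List Int),
      (ts.foldl (fun r t => r.set (t % n) c) res).length = res.length := by
  intro ts
  induction ts with
  | nil => intro res; rfl
  | cons t ts ih => intro res; rw [List.foldl_cons, ih, List.length_set]

lemma pvFoldlSet_getD (n : Nat) (c : Int) :
    ∀ (ts : List Nat) (res : List Int) (x : Nat), x < res.length →
      (ts.foldl (fun r t => r.set (t % n) c) res).getD x 0
        = if ts.any (fun t => decide (t % n = x)) then c else res.getD x 0 := by
  intro ts
  induction ts with
  | nil => intro res x _; simp
  | cons t ts ih =>
    intro res x hx
    rw [List.foldl_cons, ih (res.set (t % n) c) x (by rw [List.length_set]; exact hx)]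
    by_cases h1 : t % n = x
    · subst h1
      simp only [List.any_cons, decide_true, Bool.true_or, if_true]
      by_cases h2 : ts.any (fun t' => decide (t' % n = t % n)) = true
      · rw [if_pos h2]
      · rw [if_neg h2]
        rw [List.getD_eq_getElem _ _ (by rw [List.length_set]; exact hx),
            List.getElem_set, if_pos rfl]
    · have : (decide (t % n = x)) = false := by simpa using h1
      simp only [List.any_cons, this, Bool.false_or]
      by_cases h2 : ts.any (fun t' => decide (t' % n = x)) = true
      · rw [if_pos h2, if_pos h2]
      · rw [if_neg h2, if_neg h2]
        rw [List.getD_eq_getElem _ _ (by rw [List.length_set]; exact hx),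
            List.getD_eq_getElem _ _ hx, List.getElem_set, if_neg h1]

lemma pvGood_self (nums : List Int) (k : Nat) : pvGood nums (k+1) k = true := by
  unfold pvGood
  rw [Nat.sub_self]
  rfl

lemma pvGood_succ (nums : List Int) {k t : Nat} (h : t < k) :
    pvGood nums (k+1) t = (pvGood nums k t && decide (pvCirc nums t ≤ pvCirc nums k)) := by
  unfold pvGood
  have h1 : (k+1) - (t+1) = (k - (t+1)) + 1 := by omega
  rw [h1, List.range'_concat]
  have h2 : (t+1) + 1 * (k - (t+1)) = k := by omega
  rw [h2, List.all_append]
  simp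

lemma pvFilter_succ (nums : List Int) (k : Nat) :
    ((List.range k).filter (pvGood nums k)).filter (fun t => decide (pvCirc nums t ≤ pvCirc nums k))
      = (List.range k).filter (pvGood nums (k+1)) := by
  rw [List.filter_filter]
  apply List.filter_congr
  intro t ht
  rw [List.mem_range] at ht
  rw [pvGood_succ nums ht]
  exact (Bool.and_comm _ _)

lemma pvStack_pairwise (nums : List Int) (k : Nat) :
    (((List.range k).filter (pvGood nums k)).reverse).Pairwise
      (fun a b => pvCirc nums b ≤ pvCirc nums a) := by
  rw [List.pairwise_reverse]
  have h0 : ((List.range k).filter (pvGood nums k)).Pairwise (· < ·) :=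
    (List.pairwise_lt_range).filter _
  refine List.Pairwise.imp_of_mem ?_ h0
  intro a b ha hb hab
  have hga : pvGood nums k a = true := (List.mem_filter.mp ha).2
  have hbk : b < k := List.mem_range.mp (List.mem_filter.mp hb).1
  exact (pvGood_iff nums k a).mp hga b hab hbk

-- the heart: how res[x] evolves over one iteration of A's loop
lemma pvPFS_succ (nums : List Int) {k x : Nat} (hk : k < 2 * nums.length)
    (hx : x < nums.length) :
    pvPFS nums (k+1) x
      = if (∃ t, t < k ∧ pvGood nums k t = true ∧ pvCirc nums k < pvCirc nums t
              ∧ t % nums.length = x)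
        then pvCirc nums k else pvPFS nums k x := by
  have hn : 0 < nums.length := by omega
  have hxmod : x % nums.length = x := Nat.mod_eq_of_lt hx
  by_cases hkx : k ≤ x
  · have hne : ¬ (∃ t, t < k ∧ pvGood nums k t = true ∧ pvCirc nums k < pvCirc nums t
        ∧ t % nums.length = x) := by
      rintro ⟨t, ht, -, -, hmod⟩
      have : t % nums.length = t := Nat.mod_eq_of_lt (by omega)
      omega
    rw [if_neg hne]
    unfold pvPFS
    have : (k+1) - (x+1) = k - (x+1) := by omega
    rw [this]
  · push_neg at hkx
    have hw : (k+1) - (x+1) = (k - (x+1)) + 1 := by omega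
    have hsplit : List.range' (x+1) ((k+1) - (x+1))
        = List.range' (x+1) (k - (x+1)) ++ [k] := by
      rw [hw, List.range'_concat]
      congr 1
      · congr 1
        omega
    cases hfind : (List.range' (x+1) (k - (x+1))).find?
        (fun u => decide (pvCirc nums u < pvCirc nums x)) with
    | some u =>
      have hu := List.find?_range'_eq_some.mp hfind
      rw [List.mem_range'_1] at hu
      have hub : x + 1 ≤ u ∧ u < x + 1 + (k - (x+1)) := hu.2.1
      have hup : pvCirc nums u < pvCirc nums x := by simpa using hu.1
      have humin : ∀ j, x + 1 ≤ j → j < u → ¬ (pvCirc nums j < pvCirc nums x) := by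
        intro j h1 h2
        have := hu.2.2 j h1 h2
        simpa using this
      have hPk1 : pvPFS nums (k+1) x = pvCirc nums u := by
        unfold pvPFS
        rw [hsplit, List.find?_append, hfind]
        rfl
      have hPk : pvPFS nums k x = pvCirc nums u := by
        unfold pvPFS
        rw [hfind]
      by_cases hex : ∃ t, t < k ∧ pvGood nums k t = true ∧ pvCirc nums k < pvCirc nums t
          ∧ t % nums.length = x
      · rw [if_pos hex, hPk1]
        obtain ⟨t, htk, htg, htp, htm⟩ := hex
        rcases pvMod_char nums (by omega) htm with rfl | rfl
        · exfalso
          exact absurd hup (not_lt.mpr ((pvGood_iff nums k t).mp htg u (by omega) (by omega)))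
        · -- t = x + n: the second copy of x is popped now; the value written equals
          -- the value already recorded (u + n = k)
          have hgx : ∀ w, x + nums.length < w → w < k → pvCirc nums x ≤ pvCirc nums w := by
            intro w h1 h2
            have := (pvGood_iff nums k (x + nums.length)).mp htg w h1 h2
            rwa [pvCirc_period] at this
          have hck : pvCirc nums k < pvCirc nums x := by
            rwa [pvCirc_period] at htp
          have h1 : ¬ (u + nums.length < k) := by
            intro hlt
            have := hgx (u + nums.length) (by omega) hlt
            rw [pvCirc_period] at this
            omega
          have h2 : u ≤ k - nums.length := by
            by_contra h2
            push_neg at h2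
            have hkn : x + 1 ≤ k - nums.length := by omega
            have : pvCirc nums (k - nums.length) < pvCirc nums x := by
              have : pvCirc nums ((k - nums.length) + nums.length) = pvCirc nums (k - nums.length) :=
                pvCirc_period nums _
              rw [show (k - nums.length) + nums.length = k by omega] at this
              omega
            exact humin (k - nums.length) hkn (by omega) this
          have hukn : u + nums.length = k := by omega
          have : pvCirc nums k = pvCirc nums u := by
            rw [← hukn, pvCirc_period]
          omega
      · rw [if_neg hex, hPk1, hPk]
    | none =>
      have hnone : ∀ w, x + 1 ≤ w → w < k → ¬ (pvCirc nums w < pvCirc nums x) := by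
        intro w h1 h2
        have := List.find?_range'_eq_none.mp hfind w h1 (by omega)
        simpa using this
      have hPk : pvPFS nums k x = -1 := by
        unfold pvPFS
        rw [hfind]
      have hPk1 : pvPFS nums (k+1) x
          = if pvCirc nums k < pvCirc nums x then pvCirc nums k else -1 := by
        unfold pvPFS
        rw [hsplit, List.find?_append, hfind]
        by_cases hc : pvCirc nums k < pvCirc nums x
        · simp [List.find?, hc]
        · simp [List.find?, hc]
      by_cases hc : pvCirc nums k < pvCirc nums x
      · rw [hPk1, if_pos hc]
        have hex : ∃ t, t < k ∧ pvGood nums k t = true ∧ pvCirc nums k < pvCirc nums t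
            ∧ t % nums.length = x := by
          refine ⟨x, hkx, ?_, hc, hxmod⟩
          rw [pvGood_iff]
          intro w h1 h2
          exact not_lt.mp (hnone w (by omega) h2)
        rw [if_pos hex]
      · rw [hPk1, if_neg hc]
        have hne : ¬ (∃ t, t < k ∧ pvGood nums k t = true ∧ pvCirc nums k < pvCirc nums t
            ∧ t % nums.length = x) := by
          rintro ⟨t, htk, -, htp, htm⟩
          rcases pvMod_char nums (by omega) htm with rfl | rfl
          · exact hc htp
          · rw [pvCirc_period] at htp
            exact hc htp
        rw [if_neg hne, hPk]

lemma pvResS_getD (nums : List Int) (k x : Nat) (hx : x < nums.length) :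
    (pvResS nums k).getD x 0 = pvPFS nums k x := by
  unfold pvResS
  rw [List.getD_eq_getElem _ _ (by simpa using hx)]
  simp

lemma pvRes_succ (nums : List Int) (k : Nat) (hk : k < 2 * nums.length) :
    ((((List.range k).filter (pvGood nums k)).reverse.filter
        (fun t => decide (pvCirc nums k < pvCirc nums t))).foldl
        (fun r t => r.set (t % nums.length) (pvCirc nums k)) (pvResS nums k))
      = pvResS nums (k+1) := by
  have hlen : (pvResS nums k).length = nums.length := by simp [pvResS]
  apply List.ext_getElem
  · rw [pvFoldlSet_length]
    simp [pvResS]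
  · intro x h1 h2
    rw [pvFoldlSet_length, hlen] at h1
    rw [← List.getD_eq_getElem _ 0, ← List.getD_eq_getElem _ 0]
    rw [pvFoldlSet_getD _ _ _ _ _ (by omega), pvResS_getD nums (k+1) x h1,
        pvResS_getD nums k x h1, pvPFS_succ nums hk h1]
    have hiff : ((((List.range k).filter (pvGood nums k)).reverse.filter
          (fun t => decide (pvCirc nums k < pvCirc nums t))).any
          (fun t => decide (t % nums.length = x)) = true)
        ↔ (∃ t, t < k ∧ pvGood nums k t = true ∧ pvCirc nums k < pvCirc nums t
            ∧ t % nums.length = x) := by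
      rw [List.any_eq_true]
      constructor
      · rintro ⟨t, ht, hdec⟩
        rw [List.mem_filter, List.mem_reverse, List.mem_filter, List.mem_range] at ht
        exact ⟨t, ht.1.1, ht.1.2, by simpa using ht.2, by simpa using hdec⟩
      · rintro ⟨t, h1', h2', h3', h4'⟩
        refine ⟨t, ?_, by simpa using h4'⟩
        rw [List.mem_filter, List.mem_reverse, List.mem_filter, List.mem_range]
        exact ⟨⟨h1', h2'⟩, by simpa using h3'⟩
    by_cases hex : ∃ t, t < k ∧ pvGood nums k t = true ∧ pvCirc nums k < pvCirc nums t
        ∧ t % nums.length = x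
    · rw [if_pos (hiff.mpr hex), if_pos hex]
    · rw [if_neg (fun h => hex (hiff.mp h)), if_neg hex]

lemma pvStep_eq (nums : List Int) (k : Nat) (hk : k < 2 * nums.length) :
    pvStepA nums (pvResS nums k, pvStkS nums k) (k : Int)
      = (pvResS nums (k+1), pvStkS nums (k+1)) := by
  have hm : PySem.Int.mod (k : Int) (nums.length : Int) = pvEnc nums k := by
    simpa [pvEnc] using PySem.Int.mod_natCast k nums.length
  have h2 : List.map (pvEnc nums) ((List.filter (pvGood nums (k+1)) (List.range (k+1))).reverse)
      = pvEnc nums k :: List.map (pvEnc nums)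
          (List.filter (fun t => decide (pvCirc nums t ≤ pvCirc nums k))
            ((List.filter (pvGood nums k) (List.range k)).reverse)) := by
    rw [List.filter_reverse, pvFilter_succ, List.range_succ, List.filter_append,
        List.filter_cons, pvGood_self nums k]
    simp
  unfold pvStepA
  simp only [hm]
  unfold pvStkS
  rw [pvWhileA_eq nums k _ (pvStack_pairwise nums k) (pvResS nums k)]
  rw [Prod.mk.injEq]
  constructor
  · exact pvRes_succ nums k hk
  · exact h2.symm

lemma pvPFS_zero (nums : List Int) (x : Nat) : pvPFS nums 0 x = -1 := by
  unfold pvPFS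
  rw [Nat.zero_sub]
  rfl

lemma pvLoop_eq (nums : List Int) :
    ∀ k, k ≤ 2 * nums.length → pvLoop nums k = (pvResS nums k, pvStkS nums k) := by
  intro k
  induction k with
  | zero =>
    intro _
    unfold pvLoop pvResS pvStkS
    simp only [List.range_zero, List.foldl_nil, List.filter_nil, List.reverse_nil, List.map_nil]
    have h0 : (List.range nums.length).map (pvPFS nums 0)
        = (List.range nums.length).map (fun _ => (-1 : Int)) :=
      List.map_congr_left (fun x _ => pvPFS_zero nums x)
    rw [h0, List.map_const']
    simp
  | succ k ih =>
    intro hk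
    have h1 : pvLoop nums (k+1) = pvStepA nums (pvLoop nums k) (k : Int) := by
      unfold pvLoop
      rw [List.range_succ, List.foldl_append, List.foldl_cons, List.foldl_nil]
    rw [h1, ih (by omega), pvStep_eq nums k (by omega)]

lemma pvA_eq_loop (nums : List Int) :
    nextSmallerElements nums = (pvLoop nums (2 * nums.length)).1 := by
  unfold nextSmallerElements pvLoop
  rw [PySem.List.pyRange_one, List.foldl_map]
  have h1 : (((nums.length : Int) * 2 - 0)).toNat = 2 * nums.length := by omega
  rw [h1]
  simp only [zero_add]

-- after all 2n iterations, res[x] is exactly B's brute-force circular scan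
lemma pvPFS_final (nums : List Int) {x : Nat} (hx : x < nums.length) :
    pvPFS nums (2 * nums.length) x = pvFirstSmaller nums nums.length x := by
  have hn : 0 < nums.length := by omega
  have hxmod : x % nums.length = x := Nat.mod_eq_of_lt hx
  have hfun : (fun j : Nat => (let v := nums.getD ((x + j) % nums.length) 0;
        if v < nums.getD x 0 then some v else none))
      = (fun j : Nat => if pvCirc nums (x + j) < pvCirc nums x
          then some (pvCirc nums (x + j)) else none) := by
    funext j
    simp only [pvCirc, hxmod]
  unfold pvFirstSmaller
  rw [hfun]
  cases hfind : (List.range' (x+1) (2 * nums.length - (x+1))).find?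
      (fun u => decide (pvCirc nums u < pvCirc nums x)) with
  | some u =>
    have hu := List.find?_range'_eq_some.mp hfind
    rw [List.mem_range'_1] at hu
    have hub : x + 1 ≤ u ∧ u < x + 1 + (2 * nums.length - (x+1)) := hu.2.1
    have hup : pvCirc nums u < pvCirc nums x := by simpa using hu.1
    have humin : ∀ j, x + 1 ≤ j → j < u → ¬ (pvCirc nums j < pvCirc nums x) := by
      intro j h1 h2
      have := hu.2.2 j h1 h2
      simpa using this
    have hune : u ≠ x + nums.length := by
      intro h
      rw [h, pvCirc_period] at hup
      omega
    have hult : u < x + nums.length := by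
      by_contra h
      push_neg at h
      have hgt : x + nums.length < u := by omega
      have : pvCirc nums (u - nums.length) < pvCirc nums x := by
        have := pvCirc_period nums (u - nums.length)
        rw [show (u - nums.length) + nums.length = u by omega] at this
        omega
      exact humin (u - nums.length) (by omega) (by omega) this
    have hPFS : pvPFS nums (2 * nums.length) x = pvCirc nums u := by
      unfold pvPFS
      rw [hfind]
    rw [hPFS]
    have key : ∀ (s m : Nat), 1 ≤ s → s ≤ u - x → u - x < s + m →
        (List.range' s m).findSome? (fun j : Nat =>
          if pvCirc nums (x + j) < pvCirc nums x
          then some (pvCirc nums (x + j)) else none) = some (pvCirc nums u) := by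
      intro s m
      induction m generalizing s with
      | zero => intro h0 h1 h2; omega
      | succ m ihm =>
        intro h0 h1 h2
        rw [List.range'_succ, List.findSome?_cons]
        by_cases hs : s = u - x
        · rw [hs, show x + (u - x) = u by omega, if_pos hup]
        · have h3 : ¬ (pvCirc nums (x + s) < pvCirc nums x) :=
            humin (x + s) (by omega) (by omega)
          rw [if_neg h3]
          exact ihm (s+1) (by omega) (by omega) (by omega)
    rw [key 1 (nums.length - 1) le_rfl (by omega) (by omega)]
    rfl
  | none =>
    have hnone : ∀ w, x + 1 ≤ w → w < 2 * nums.length → ¬ (pvCirc nums w < pvCirc nums x) := by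
      intro w h1 h2
      have := List.find?_range'_eq_none.mp hfind w h1 (by omega)
      simpa using this
    have hPFS : pvPFS nums (2 * nums.length) x = -1 := by
      unfold pvPFS
      rw [hfind]
    rw [hPFS]
    have hns : (List.range' 1 (nums.length - 1)).findSome? (fun j : Nat =>
        if pvCirc nums (x + j) < pvCirc nums x
        then some (pvCirc nums (x + j)) else none) = none := by
      rw [List.findSome?_eq_none_iff]
      intro j hj
      rw [List.mem_range'_1] at hj
      rw [if_neg]
      exact hnone (x + j) (by omega) (by omega)
    rw [hns]
    rfl

-- ===== VERDICT (by name: the statement is the Claim_ definition above) =====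
theorem nextSmallerElements_spec : Claim_equal_nextSmallerElements := by
  intro nums _
  show nextSmallerElements nums = nextSmallerElements_alt nums
  rw [pvA_eq_loop, pvLoop_eq nums (2 * nums.length) le_rfl]
  show pvResS nums (2 * nums.length) = _
  unfold pvResS nextSmallerElements_alt
  apply List.map_congr_left
  intro x hxm
  exact pvPFS_final nums (List.mem_range.mp hxm)
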